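-- pv_equiv track=rewrite | github.com/zitterbewegung/VeryLargeWeebModel | scripts/knot_counterexamples/search_n_move.py | normalize_braid_word
-- ===== SOURCE A (Python) =====
-- from typing import Any, Deque, Dict, Iterable, List, Optional, Sequence, Tuple
--
-- BraidWord = Tuple[int, ...]
--
-- def normalize_braid_word(word: Sequence[int]) -> BraidWord:
--     """Cancel adjacent inverse generators until stable."""
--     current = list(word)
--     changed = True
--     while changed:
--         changed = False
--         out: List[int] = []
--         idx = 0
--         while idx < len(current):
--             if idx + 1 < len(current) and current[idx] == -current[idx + 1]:
--                 changed = True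
--                 idx += 2
--                 continue
--             out.append(current[idx])
--             idx += 1
--         current = out
--     return tuple(current)
-- ===== SOURCE B (Python) =====
-- def normalize_braid_word(word):
--     """Cancel adjacent inverse generators until stable (single stack pass)."""
--     stack = []
--     for x in word:
--         if stack and stack[-1] == -x:
--             stack.pop()
--         else:
--             stack.append(x)
--     return tuple(stack)
-- ===== Notes on version B (the rewrite author's own statement) =====
-- stated objective: faster
-- what changed: Replaces A's repeated full passes (re-scanning until no adjacent inverse pair remains) with a single left-to-right stack pass that pops whenever the next letter negates the stack top.
import Mathlib
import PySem

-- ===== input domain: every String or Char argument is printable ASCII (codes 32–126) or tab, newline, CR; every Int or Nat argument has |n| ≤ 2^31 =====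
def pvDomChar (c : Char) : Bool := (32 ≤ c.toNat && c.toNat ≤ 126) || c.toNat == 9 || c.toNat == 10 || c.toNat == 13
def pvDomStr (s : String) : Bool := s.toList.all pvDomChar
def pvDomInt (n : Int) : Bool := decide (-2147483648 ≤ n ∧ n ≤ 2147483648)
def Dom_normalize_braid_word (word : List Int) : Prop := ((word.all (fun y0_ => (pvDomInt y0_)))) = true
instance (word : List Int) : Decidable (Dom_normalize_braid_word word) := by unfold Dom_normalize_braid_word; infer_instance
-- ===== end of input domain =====

-- B replaces A's repeated full cancellation passes by a single stack pass (asymptotically faster).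

-- ===== PORT A =====
-- one inner pass of A: scans left to right, cancelling adjacent inverse pairs,
-- returning the new word and the 'changed' flag
def nbwPass : List Int → List Int × Bool
  | [] => ([], false)
  | [a] => ([a], false)
  | a :: b :: t =>
    if a = -b then ((nbwPass t).1, true)
    else
      let r := nbwPass (b :: t)
      (a :: r.1, r.2)

theorem nbwPass_length (w : List Int) : (nbwPass w).1.length ≤ w.length := by
  induction w using nbwPass.induct with
  | case1 => simp [nbwPass]
  | case2 a => simp [nbwPass]
  | case3 b t ih =>
    simp only [nbwPass, if_pos rfl]
    simpa using Nat.le_succ_of_le (Nat.le_succ_of_le ih)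
  | case4 a b t h ih => simp only [nbwPass, if_neg h]; simpa using ih

theorem nbwPass_length_lt (w : List Int) (h : (nbwPass w).2 = true) :
    (nbwPass w).1.length < w.length := by
  induction w using nbwPass.induct with
  | case1 => simp [nbwPass] at h
  | case2 a => simp [nbwPass] at h
  | case3 b t ih =>
    simp only [nbwPass, if_pos rfl]
    have := nbwPass_length t
    simp; omega
  | case4 a b t hc ih =>
    simp only [nbwPass, if_neg hc] at h ⊢
    have := ih h
    simpa using Nat.succ_lt_succ this

-- A's outer while loop: repeat the pass while it reports a change
def nbwLoop (w : List Int) : List Int :=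
  let r := nbwPass w
  if h : r.2 = true then nbwLoop r.1 else r.1
termination_by w.length
decreasing_by exact nbwPass_length_lt w h

def normalize_braid_word (word : List Int) : List Int := nbwLoop word

-- ===== PORT B =====
-- python stack with its top at the head of the list (the final reverse restores order)
def nbwPush (stack : List Int) (x : Int) : List Int :=
  match stack with
  | t :: s => if t = -x then s else x :: t :: s
  | [] => [x]

def normalize_braid_word_alt (word : List Int) : List Int :=
  (word.foldl nbwPush []).reverse

-- ===== PRECONDITION & SPEC =====
def Spec_normalize_braid_word (word : List Int) (out : List Int) : Prop := out = normalize_braid_word_alt word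
instance (word : List Int) (out : List Int) : Decidable (Spec_normalize_braid_word word out) := by unfold Spec_normalize_braid_word; infer_instance

-- ===== CLAIM (what is proved, stated in full; the proofs are below) =====
def Claim_equal_normalize_braid_word : Prop := ∀ (word : List Int), Dom_normalize_braid_word word → Spec_normalize_braid_word word (normalize_braid_word word)

-- ===== LEMMAS AND PROOFS =====

-- a list (word or stack) with no adjacent inverse pair
def NbwRed (w : List Int) : Prop := List.IsChain (fun a b => a ≠ -b) w

theorem nbwPush_red {st : List Int} (h : NbwRed st) (x : Int) : NbwRed (nbwPush st x) := by
  unfold NbwRed at *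
  cases st with
  | nil => simp [nbwPush]
  | cons t s =>
    simp only [nbwPush]
    split
    · exact h.tail
    · rename_i hne
      exact List.isChain_cons_cons.2 ⟨fun hx => hne (by omega), h⟩

theorem nbwPush_cancel {st : List Int} (h : NbwRed st) (a : Int) :
    nbwPush (nbwPush st a) (-a) = st := by
  cases st with
  | nil => simp [nbwPush]
  | cons t s =>
    by_cases ht : t = -a
    · -- push pops t; then pushing -a must push back (stack reduced: next elt ≠ a)
      simp only [nbwPush, if_pos ht]
      cases s with
      | nil => simp [nbwPush, ht]
      | cons u s' =>
        have hu : t ≠ -u := (List.isChain_cons_cons.1 h).1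
        have hne : ¬ u = a := by intro hc; apply hu; omega
        simp [nbwPush, ht, hne]
    · simp [nbwPush, if_neg ht]

-- pushing the output of one pass equals pushing the original word (for a reduced stack)
theorem foldl_nbwPass (w : List Int) :
    ∀ st : List Int, NbwRed st →
      List.foldl nbwPush st (nbwPass w).1 = List.foldl nbwPush st w := by
  induction w using nbwPass.induct with
  | case1 => intro st _; simp [nbwPass]
  | case2 a => intro st _; simp [nbwPass]
  | case3 b t ih =>
    intro st hst
    simp only [nbwPass, if_pos rfl, if_true, eq_self_iff_true, List.foldl_cons]
    have hc := nbwPush_cancel hst (-b)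
    rw [neg_neg] at hc
    rw [ih st hst, hc]
  | case4 a b t hc ih =>
    intro st hst
    simp only [nbwPass, if_neg hc, List.foldl_cons]
    exact ih (nbwPush st a) (nbwPush_red hst a)

-- when the pass reports no change it returned the word unchanged, and the word is reduced
theorem nbwPass_false (w : List Int) (h : (nbwPass w).2 = false) :
    (nbwPass w).1 = w ∧ NbwRed w := by
  induction w using nbwPass.induct with
  | case1 => simp [nbwPass, NbwRed]
  | case2 a => simp [nbwPass, NbwRed]
  | case3 b t ih => simp [nbwPass] at h
  | case4 a b t hc ih =>
    simp only [nbwPass, if_neg hc] at h ⊢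
    obtain ⟨h1, h2⟩ := ih h
    exact ⟨by simp [h1], List.isChain_cons_cons.2 ⟨hc, h2⟩⟩

-- the stack never pops while folding a reduced word whose head sits on top
theorem foldl_nbwPush_red (w : List Int) :
    ∀ (x : Int) (s : List Int), NbwRed (x :: w) →
      List.foldl nbwPush (x :: s) w = w.reverse ++ x :: s := by
  induction w with
  | nil => intro x s _; simp
  | cons y t ih =>
    intro x s h
    have hxy : x ≠ -y := (List.isChain_cons_cons.1 h).1
    simp only [List.foldl_cons, nbwPush, if_neg hxy]
    rw [ih y (x :: s) (by simpa using h.tail)]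
    simp

theorem red_fixed (w : List Int) (h : NbwRed w) :
    (List.foldl nbwPush [] w).reverse = w := by
  cases w with
  | nil => simp
  | cons x t =>
    simp only [List.foldl_cons, nbwPush]
    rw [foldl_nbwPush_red t x [] h]
    simp

theorem nbwLoop_eq : ∀ (n : ℕ) (w : List Int), w.length ≤ n →
    nbwLoop w = (List.foldl nbwPush [] w).reverse := by
  intro n
  induction n with
  | zero =>
    intro w hw
    have : w = [] := List.eq_nil_of_length_eq_zero (Nat.le_zero.1 hw)
    subst this
    rw [nbwLoop]; simp [nbwPass]
  | succ n ih =>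
    intro w hw
    rw [nbwLoop]
    by_cases h : (nbwPass w).2 = true
    · simp only [h, dif_pos]
      have hlt := nbwPass_length_lt w h
      rw [ih _ (by omega)]
      rw [foldl_nbwPass w [] (by simp [NbwRed])]
    · have h' : (nbwPass w).2 = false := by simpa using h
      obtain ⟨h1, h2⟩ := nbwPass_false w h'
      simp only [h', Bool.false_eq_true, dite_false, h1]
      exact (red_fixed w h2).symm

-- ===== VERDICT (by name: the statement is the Claim_ definition above) =====
theorem normalize_braid_word_spec : Claim_equal_normalize_braid_word := by
  intro word _
  unfold Spec_normalize_braid_word normalize_braid_word normalize_braid_word_alt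
  exact nbwLoop_eq word.length word le_rfl
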